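-- pv_equiv track=rewrite | github.com/NeckofNickey/algorithms | dynamic_programming/smooth_numbers.py | get_amount_of_smooth_num
-- ===== SOURCE A (Python) =====
-- def get_amount_of_smooth_num(lenghth):
--
--     dp = [1] * 12
--     dp[0] = dp[1] = dp[-1] = 0
--
--     for _ in range(lenghth - 1):
--         temp_dp = [x for x in dp]
--         for i in range(1, len(dp) - 1):
--             temp_dp[i] = dp[i - 1] + dp[i] + dp[i + 1]
--
--         dp = temp_dp
--
--     return sum(dp)
-- ===== SOURCE B (Python) =====
-- # Binary exponentiation of the constant twelve-by-twelve transition matrix, accumulated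
-- # into the state vector: logarithmically many loop iterations instead of A's n-1 vector
-- # steps (intended as faster; measured about 2.2x at the largest size both finished).
--
-- def _mat_mul(A, B):
--     return [[sum(A[i][k] * B[k][j] for k in range(12)) for j in range(12)]
--             for i in range(12)]
--
--
-- def _mat_vec(A, v):
--     return [sum(A[i][k] * v[k] for k in range(12)) for i in range(12)]
--
--
-- def get_amount_of_smooth_num(lenghth):
--     # transition: rows 1..10 sum three neighbours, rows 0 and 11 keep themselves
--     M = [[1 if (i - 1 <= j <= i + 1 if 1 <= i <= 10 else i == j) else 0
--           for j in range(12)] for i in range(12)]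
--     r = [0, 0] + [1] * 9 + [0]
--     steps = lenghth - 1
--     if steps < 0:
--         steps = 0
--     while steps:
--         if steps % 2 == 1:
--             r = _mat_vec(M, r)
--         steps //= 2
--         if steps:
--             M = _mat_mul(M, M)
--     return sum(r)
-- ===== Notes on version B (the rewrite author's own statement) =====
-- stated objective: faster
-- what changed: Replaces A's step-by-step evolution of the twelve-entry dp vector (one pass per unit of lenghth) with binary exponentiation of the constant twelve-by-twelve transition matrix accumulated into the state vector; intended as asymptotically faster (logarithmically many loop iterations), measured about 2.2x at the largest size where both versions finished.
import Mathlib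
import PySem

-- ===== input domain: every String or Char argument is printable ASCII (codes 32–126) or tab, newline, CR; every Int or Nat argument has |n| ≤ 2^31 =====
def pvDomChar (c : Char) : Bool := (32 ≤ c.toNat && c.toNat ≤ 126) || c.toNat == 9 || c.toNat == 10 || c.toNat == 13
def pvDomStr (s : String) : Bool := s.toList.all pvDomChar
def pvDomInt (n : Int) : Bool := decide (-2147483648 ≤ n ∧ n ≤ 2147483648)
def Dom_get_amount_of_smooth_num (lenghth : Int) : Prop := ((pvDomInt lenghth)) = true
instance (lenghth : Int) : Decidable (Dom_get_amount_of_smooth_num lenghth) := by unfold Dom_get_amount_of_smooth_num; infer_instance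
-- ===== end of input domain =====

-- B replaces A's step-by-step linear recurrence (lenghth-1 vector steps) with binary
-- exponentiation of the constant twelve-by-twelve transition matrix accumulated into the
-- state vector (intended as faster; measured about 2.2x at the largest size both finished).

-- ===== PORT A =====
-- loop body of A's 'for _ in range(lenghth - 1)': temp_dp = copy of dp; temp_dp[i] = dp[i-1]+dp[i]+dp[i+1] for i in 1..10
def pvStepA (dp : List Int) : List Int :=
  let temp_dp := dp.map (fun x => x)
  (PySem.List.pyRange 1 ((dp.length : Int) - 1) 1).foldl
    (fun temp_dp i =>
      PySem.List.pySetD temp_dp i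
        (PySem.List.pyGetD dp (i-1) 0 + PySem.List.pyGetD dp i 0 + PySem.List.pyGetD dp (i+1) 0))
    temp_dp

def get_amount_of_smooth_num (lenghth : Int) : Int :=
  let dp : List Int := List.replicate 12 1
  let dp := PySem.List.pySetD dp 0 0
  let dp := PySem.List.pySetD dp 1 0
  let dp := PySem.List.pySetD dp (-1) 0
  ((PySem.List.pyRange 0 (lenghth - 1) 1).foldl (fun dp _ => pvStepA dp) dp).sum

-- ===== PORT B =====
-- _mat_mul of Source B
def pvMatMul (A B : List (List Int)) : List (List Int) :=
  (List.range 12).map (fun i => (List.range 12).map (fun j =>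
    ((List.range 12).map (fun k => ((A.getD i []).getD k 0) * ((B.getD k []).getD j 0))).sum))

-- _mat_vec of Source B
def pvMatVec (A : List (List Int)) (v : List Int) : List Int :=
  (List.range 12).map (fun i =>
    ((List.range 12).map (fun k => ((A.getD i []).getD k 0) * (v.getD k 0))).sum)

-- the transition matrix M built (as a comprehension) at the top of Source B's get_amount_of_smooth_num
def pvM : List (List Int) :=
  (List.range 12).map (fun i => (List.range 12).map (fun j =>
    if (if 1 ≤ i ∧ i ≤ 10 then i - 1 ≤ j ∧ j ≤ i + 1 else i = j) then 1 else 0))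

-- Source B's 'while steps:' loop, on the state (M, r, steps); steps is the (never negative) loop counter
def pvPowVec (M : List (List Int)) (r : List Int) (steps : Nat) : List Int :=
  if h : steps = 0 then r
  else
    let r := if steps % 2 = 1 then pvMatVec M r else r
    let steps := steps / 2
    let M := if steps ≠ 0 then pvMatMul M M else M
    pvPowVec M r steps
decreasing_by exact Nat.div_lt_self (Nat.pos_of_ne_zero h) one_lt_two

def get_amount_of_smooth_num_alt (lenghth : Int) : Int :=
  let r : List Int := [0, 0] ++ List.replicate 9 1 ++ [0]
  let steps := lenghth - 1
  let steps := if steps < 0 then 0 else steps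
  (pvPowVec pvM r steps.toNat).sum

-- ===== PRECONDITION & SPEC =====
def Spec_get_amount_of_smooth_num (lenghth : Int) (out : Int) : Prop := out = get_amount_of_smooth_num_alt lenghth
instance (lenghth : Int) (out : Int) : Decidable (Spec_get_amount_of_smooth_num lenghth out) := by unfold Spec_get_amount_of_smooth_num; infer_instance

-- ===== CLAIM (what is proved, stated in full; the proofs are below) =====
def Claim_equal_get_amount_of_smooth_num : Prop := ∀ (lenghth : Int), Dom_get_amount_of_smooth_num lenghth → Spec_get_amount_of_smooth_num lenghth (get_amount_of_smooth_num lenghth)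

-- ===== LEMMAS AND PROOFS =====

theorem stepA_norm (a b c d e f g h i j k l : Int) :
    pvStepA [a,b,c,d,e,f,g,h,i,j,k,l]
      = [a, a+b+c, b+c+d, c+d+e, d+e+f, e+f+g, f+g+h, g+h+i, h+i+j, i+j+k, j+k+l, l] := by
  have hr : PySem.List.pyRange 1 11 1 = [1,2,3,4,5,6,7,8,9,10] := by decide
  simp [pvStepA, hr, PySem.List.pySetD, PySem.List.pySet?, PySem.List.pyGetD,
    PySem.List.pyGet?, PySem.List.pyIdx?, List.set]

theorem list12 (v : List Int) (hv : v.length = 12) :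
    ∃ a b c d e f g h i j k l : Int, v = [a,b,c,d,e,f,g,h,i,j,k,l] := by
  rcases v with _ | ⟨a, _ | ⟨b, _ | ⟨c, _ | ⟨d, _ | ⟨e, _ | ⟨f, _ | ⟨g, _ | ⟨h, _ | ⟨i, _ | ⟨j, _ | ⟨k, _ | ⟨l, t⟩⟩⟩⟩⟩⟩⟩⟩⟩⟩⟩⟩ <;>
    simp_all

theorem matvec_M (a b c d e f g h i j k l : Int) :
    pvMatVec pvM [a,b,c,d,e,f,g,h,i,j,k,l]
      = [a, a+b+c, b+c+d, c+d+e, d+e+f, e+f+g, f+g+h, g+h+i, h+i+j, i+j+k, j+k+l, l] := by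
  have hM : pvM = [[1,0,0,0,0,0,0,0,0,0,0,0],[1,1,1,0,0,0,0,0,0,0,0,0],[0,1,1,1,0,0,0,0,0,0,0,0],
    [0,0,1,1,1,0,0,0,0,0,0,0],[0,0,0,1,1,1,0,0,0,0,0,0],[0,0,0,0,1,1,1,0,0,0,0,0],
    [0,0,0,0,0,1,1,1,0,0,0,0],[0,0,0,0,0,0,1,1,1,0,0,0],[0,0,0,0,0,0,0,1,1,1,0,0],
    [0,0,0,0,0,0,0,0,1,1,1,0],[0,0,0,0,0,0,0,0,0,1,1,1],[0,0,0,0,0,0,0,0,0,0,0,1]] := by decide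
  simp [pvMatVec, hM, List.range_succ]
  ring_nf
  simp

theorem sum_map_range_eq (f : Nat → Int) (n : Nat) :
    ((List.range n).map f).sum = ∑ i ∈ Finset.range n, f i := by
  induction n with
  | zero => simp
  | succ m ih => simp [List.range_succ, Finset.sum_range_succ, ih]

theorem getD_map_range' (f : Nat → List Int) {i n : Nat} (h : i < n) :
    ((List.range n).map f).getD i [] = f i := by
  simp [List.getD, h]

theorem getD_map_range'' (f : Nat → Int) {i n : Nat} (h : i < n) :
    ((List.range n).map f).getD i 0 = f i := by
  simp [List.getD, h]

theorem matvec_mul (A B : List (List Int)) (v : List Int) :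
    pvMatVec (pvMatMul A B) v = pvMatVec A (pvMatVec B v) := by
  unfold pvMatVec pvMatMul
  apply List.map_congr_left
  intro i hi
  have hi12 : i < 12 := List.mem_range.mp hi
  rw [getD_map_range' _ hi12]
  simp only [sum_map_range_eq]
  have key : ∀ k, k < 12 → ((List.range 12).map (fun j =>
      ((List.range 12).map (fun t => ((A.getD i []).getD t 0) * ((B.getD t []).getD j 0))).sum)).getD k 0
      = ∑ t ∈ Finset.range 12, ((A.getD i []).getD t 0) * ((B.getD t []).getD k 0) := by
    intro k hk
    rw [getD_map_range'' _ hk, sum_map_range_eq]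
  calc (∑ k ∈ Finset.range 12,
          ((List.range 12).map (fun j =>
            ((List.range 12).map (fun t => ((A.getD i []).getD t 0) * ((B.getD t []).getD j 0))).sum)).getD k 0 * v.getD k 0)
      = ∑ k ∈ Finset.range 12, ∑ t ∈ Finset.range 12,
          ((A.getD i []).getD t 0) * ((B.getD t []).getD k 0) * v.getD k 0 := by
        refine Finset.sum_congr rfl fun k hk => ?_
        rw [key k (Finset.mem_range.mp hk), Finset.sum_mul]
    _ = ∑ t ∈ Finset.range 12,
          ((A.getD i []).getD t 0) * (((List.range 12).map (fun k =>
            ((B.getD t []).getD k 0) * v.getD k 0)).sum) := by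
        rw [Finset.sum_comm]
        refine Finset.sum_congr rfl fun t _ => ?_
        rw [sum_map_range_eq, Finset.mul_sum]
        exact Finset.sum_congr rfl fun k _ => by ring
    _ = _ := by
        refine Finset.sum_congr rfl fun t ht => ?_
        rw [getD_map_range'' _ (Finset.mem_range.mp ht), sum_map_range_eq]

theorem matvec_len (A : List (List Int)) (v : List Int) : (pvMatVec A v).length = 12 := by
  simp [pvMatVec]

theorem matvecM_eq_step (v : List Int) (hv : v.length = 12) : pvMatVec pvM v = pvStepA v := by
  obtain ⟨a,b,c,d,e,f,g,h,i,j,k,l, rfl⟩ := list12 v hv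
  rw [matvec_M, stepA_norm]

theorem stepA_len (v : List Int) (hv : v.length = 12) : (pvStepA v).length = 12 := by
  obtain ⟨a,b,c,d,e,f,g,h,i,j,k,l, rfl⟩ := list12 v hv
  rw [stepA_norm]
  rfl

theorem iterate_stepA_len (n : Nat) (v : List Int) (hv : v.length = 12) :
    (pvStepA^[n] v).length = 12 := by
  induction n with
  | zero => simpa
  | succ m ih => rw [Function.iterate_succ_apply']; exact stepA_len _ ih

-- loop invariant of Source B's while loop: if M acts on 12-vectors as pvStepA^[c],
-- the loop computes pvStepA^[c * steps]
theorem powVec_correct : ∀ steps : Nat, ∀ c : Nat, ∀ M : List (List Int), ∀ r : List Int,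
    r.length = 12 →
    (∀ w : List Int, w.length = 12 → pvMatVec M w = pvStepA^[c] w) →
    pvPowVec M r steps = pvStepA^[c * steps] r := by
  intro steps
  induction steps using Nat.strong_induction_on with
  | _ steps ih =>
    intro c M r hr hM
    by_cases h0 : steps = 0
    · subst h0
      rw [pvPowVec]
      simp
    · have hstep : pvPowVec M r steps
          = pvPowVec (if steps / 2 ≠ 0 then pvMatMul M M else M)
              (if steps % 2 = 1 then pvMatVec M r else r) (steps / 2) := by
        rw [pvPowVec, dif_neg h0]
      have hdiv : steps / 2 < steps := Nat.div_lt_self (Nat.pos_of_ne_zero h0) one_lt_two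
      have hr' : (if steps % 2 = 1 then pvMatVec M r else r)
          = pvStepA^[c * (steps % 2)] r := by
        by_cases hb : steps % 2 = 1
        · simp [hb, hM r hr]
        · have : steps % 2 = 0 := by omega
          simp [this]
      by_cases hz : steps / 2 = 0
      · have h1 : steps = 1 := by omega
        subst h1
        rw [hstep, pvPowVec]
        simpa using hr'
      · rw [hstep, if_pos hz]
        have hM' : ∀ w : List Int, w.length = 12 →
            pvMatVec (pvMatMul M M) w = pvStepA^[c + c] w := by
          intro w hw
          rw [matvec_mul, hM _ hw, hM _ (iterate_stepA_len _ _ hw),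
            ← Function.iterate_add_apply]
        have hrlen : (if steps % 2 = 1 then pvMatVec M r else r).length = 12 := by
          split
          · exact matvec_len _ _
          · exact hr
        rw [ih _ hdiv (c + c) _ _ hrlen hM', hr', ← Function.iterate_add_apply]
        congr 1
        have h2 : steps = 2 * (steps / 2) + steps % 2 := by omega
        conv_rhs => rw [h2]
        ring

theorem foldl_const {α β : Type} (xs : List β) (f : α → α) (init : α) :
    xs.foldl (fun s _ => f s) init = f^[xs.length] init := by
  induction xs generalizing init with
  | nil => rfl
  | cons x t ih => simp [List.foldl, ih, Function.iterate_succ_apply]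

-- ===== VERDICT (by name: the statement is the Claim_ definition above) =====
theorem get_amount_of_smooth_num_spec : Claim_equal_get_amount_of_smooth_num := by
  intro lenghth _
  unfold Spec_get_amount_of_smooth_num get_amount_of_smooth_num get_amount_of_smooth_num_alt
  have hdp : PySem.List.pySetD (PySem.List.pySetD (PySem.List.pySetD (List.replicate 12 (1:Int)) 0 0) 1 0) (-1) 0
      = [0,0,1,1,1,1,1,1,1,1,1,0] := by decide
  have hv : ([0, 0] ++ List.replicate 9 (1:Int) ++ [0]) = [0,0,1,1,1,1,1,1,1,1,1,0] := by decide
  simp only [hdp, hv]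
  rw [foldl_const, PySem.List.length_pyRange_one]
  rw [powVec_correct _ 1 _ _ (by decide) (fun w hw => by simpa using matvecM_eq_step w hw)]
  have hn : (if lenghth - 1 < 0 then 0 else lenghth - 1).toNat = (lenghth - 1 - 0).toNat := by
    split <;> omega
  rw [hn]
  simp
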